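-- pv_equiv track=rewrite | github.com/ggrelaxi/course3-algorythm-tasks | task8.py | SumOfThe
-- ===== SOURCE A (Python) =====
-- def SumOfThe(N, data):
--     for i in range(N):
--         actual = data[i]
--         summ = 0
--         for j in range(i, N):
--             summ += data[j]
--         if actual == summ:
--             return summ
-- ===== SOURCE B (Python) =====
-- def SumOfThe(N, data):
--     summ = 0
--     result = None
--     for i in range(N - 1, -1, -1):
--         summ += data[i]
--         if data[i] == summ:
--             result = summ
--     return result
-- ===== Notes on version B (the rewrite author's own statement) =====
-- stated objective: faster
-- what changed: A recomputes the suffix sum from scratch for each index (nested loops); B makes a single backward pass maintaining a running suffix sum and remembering the lowest-index match, removing the inner loop.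
import Mathlib
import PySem

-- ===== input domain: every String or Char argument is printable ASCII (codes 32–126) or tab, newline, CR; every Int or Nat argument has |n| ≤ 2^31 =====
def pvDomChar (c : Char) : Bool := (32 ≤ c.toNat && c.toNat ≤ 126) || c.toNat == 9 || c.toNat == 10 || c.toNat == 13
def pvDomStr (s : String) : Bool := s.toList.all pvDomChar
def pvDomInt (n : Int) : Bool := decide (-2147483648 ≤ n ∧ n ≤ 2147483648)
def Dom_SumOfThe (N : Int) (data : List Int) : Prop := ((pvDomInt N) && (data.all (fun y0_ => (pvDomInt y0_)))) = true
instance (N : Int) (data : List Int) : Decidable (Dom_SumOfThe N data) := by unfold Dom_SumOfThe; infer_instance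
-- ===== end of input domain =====

-- B replaces A's nested loops (a fresh suffix sum per index) by one backward pass with a
-- running suffix sum that remembers the lowest-index match: O(N) instead of O(N^2).

-- ===== PORT A =====
-- outer loop 'for i in range(N)' with early return; inner loop is the foldl over range(i, N).
-- pyGet? returning none models Python's IndexError (excluded by Pre_).
def SumOfTheGoA (N : Int) (data : List Int) : List Int → Option Int
  | [] => none
  | i :: rest =>
    match PySem.List.pyGet? data i with
    | none => none
    | some actual =>
      match (PySem.List.pyRange i N 1).foldl
          (fun s? j => s?.bind (fun s => (PySem.List.pyGet? data j).map (fun v => s + v)))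
          (some 0) with
      | none => none
      | some summ => if actual = summ then some summ else SumOfTheGoA N data rest

def SumOfThe (N : Int) (data : List Int) : Option Int :=
  SumOfTheGoA N data (PySem.List.pyRange 0 N 1)

-- ===== PORT B =====
-- single backward pass 'for i in range(N-1, -1, -1)' carrying (summ, result).
def SumOfTheGoB (data : List Int) : List Int → Int → Option Int → Option Int
  | [], _, result => result
  | i :: rest, summ, result =>
    match PySem.List.pyGet? data i with
    | none => none
    | some v =>
      SumOfTheGoB data rest (summ + v) (if v = summ + v then some (summ + v) else result)

def SumOfThe_alt (N : Int) (data : List Int) : Option Int :=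
  SumOfTheGoB data (PySem.List.pyRange (N - 1) (-1) (-1)) 0 none

-- ===== PRECONDITION & SPEC =====
-- Pre_ excludes exactly the inputs where the Python A raises IndexError: N > len(data).
def Pre_SumOfThe (N : Int) (data : List Int) : Prop := N ≤ (data.length : Int)
instance (N : Int) (data : List Int) : Decidable (Pre_SumOfThe N data) := by
  unfold Pre_SumOfThe; infer_instance

def pvWitness_SumOfThe : Int × List Int := (3, [1, 2, 3])

def Spec_SumOfThe (N : Int) (data : List Int) (out : Option Int) : Prop := out = SumOfThe_alt N data
instance (N : Int) (data : List Int) (out : Option Int) : Decidable (Spec_SumOfThe N data out) := by unfold Spec_SumOfThe; infer_instance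

-- ===== CLAIM (what is proved, stated in full; the proofs are below) =====
def Claim_equal_SumOfThe : Prop := ∀ (N : Int) (data : List Int), Dom_SumOfThe N data → Pre_SumOfThe N data → Spec_SumOfThe N data (SumOfThe N data)

-- ===== LEMMAS AND PROOFS =====

-- pure first-match function: first element x of l with x = x + (rest of l).sum, returning that sum
def pvFm (l : List Int) : Option Int :=
  match l with
  | [] => none
  | x :: xs => if x = x + xs.sum then some (x + xs.sum) else pvFm xs

-- pure version of B's backward pass
def pvBm : List Int → Int → Option Int → Option Int
  | [], _, b => b
  | x :: rest, s, b => pvBm rest (s + x) (if x = s + x then some (s + x) else b)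

theorem pvGet_eq (data : List Int) (i : Int) (hi : 0 ≤ i) (hil : i < (data.length : Int)) :
    PySem.List.pyGet? data i = some (data[i.toNat]'(by omega)) := by
  simp only [PySem.List.pyGet?, PySem.List.pyIdx?]
  rw [if_pos hi, if_pos hil]
  simp [List.getElem?_eq_getElem (show i.toNat < data.length by omega)]

theorem pvBm_append (u v : List Int) (s : Int) (b : Option Int) :
    pvBm (u ++ v) s b = pvBm v (s + u.sum) (pvBm u s b) := by
  induction u generalizing s b with
  | nil => simp [pvBm]
  | cons x xs ih =>
    simp only [List.cons_append, pvBm, List.sum_cons, ih]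
    ring_nf

theorem pvBm_reverse (l : List Int) (b : Option Int) :
    pvBm l.reverse 0 b = (pvFm l).or b := by
  induction l generalizing b with
  | nil => simp [pvBm, pvFm]
  | cons x xs ih =>
    rw [List.reverse_cons, pvBm_append, ih, List.sum_reverse]
    simp only [pvBm, pvFm]
    by_cases hx : x = x + xs.sum
    · rw [if_pos (by omega : x = 0 + xs.sum + x), if_pos hx, Option.some_or]
      congr 1
      omega
    · rw [if_neg (by omega), if_neg hx]

-- the inner fold of A computes the suffix sum
theorem pvInnerFold (data : List Int) (N : Int) (hN : N ≤ (data.length : Int)) :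
    ∀ (k : ℕ) (i s : Int), 0 ≤ i → i ≤ N → k = (N - i).toNat →
    (PySem.List.pyRange i N 1).foldl
        (fun s? j => s?.bind (fun s => (PySem.List.pyGet? data j).map (fun v => s + v)))
        (some s)
      = some (s + (((data.take N.toNat).drop i.toNat).sum)) := by
  intro k
  induction k with
  | zero =>
    intro i s hi hiN hk
    have hNi : N ≤ i := by omega
    rw [PySem.List.pyRange_one_eq_nil hNi]
    have : (data.take N.toNat).drop i.toNat = [] := by
      apply List.drop_eq_nil_of_le
      simp
      omega
    simp [this]
  | succ k ih =>
    intro i s hi hiN hk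
    have hlt : i < N := by omega
    rw [PySem.List.pyRange_one_cons hlt]
    have hilen : i < (data.length : Int) := lt_of_lt_of_le hlt hN
    rw [List.foldl_cons, pvGet_eq data i hi hilen]
    simp only [Option.bind_some, Option.map_some]
    rw [ih (i + 1) (s + data[i.toNat]'(by omega)) (by omega) (by omega) (by omega)]
    have hlen : (data.take N.toNat).length = N.toNat := by simp; omega
    have hdrop : (data.take N.toNat).drop i.toNat
        = (data.take N.toNat)[i.toNat]'(by omega) :: (data.take N.toNat).drop (i.toNat + 1) := by
      exact List.drop_eq_getElem_cons (by omega)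
    have hgetTake : (data.take N.toNat)[i.toNat]'(by omega) = data[i.toNat]'(by omega) := by
      simp [List.getElem_take]
    have hi1 : (i + 1).toNat = i.toNat + 1 := by omega
    rw [hi1, hdrop, hgetTake]
    simp only [List.sum_cons]
    ring_nf

-- A's outer loop equals pvFm of the remaining segment
theorem pvGoA_eq (data : List Int) (N : Int) (hN : N ≤ (data.length : Int)) :
    ∀ (k : ℕ) (i : Int), 0 ≤ i → i ≤ N → k = (N - i).toNat →
    SumOfTheGoA N data (PySem.List.pyRange i N 1) = pvFm ((data.take N.toNat).drop i.toNat) := by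
  intro k
  induction k with
  | zero =>
    intro i hi hiN hk
    have hNi : N ≤ i := by omega
    rw [PySem.List.pyRange_one_eq_nil hNi]
    have : (data.take N.toNat).drop i.toNat = [] := by
      apply List.drop_eq_nil_of_le
      simp
      omega
    simp [this, SumOfTheGoA, pvFm]
  | succ k ih =>
    intro i hi hiN hk
    have hlt : i < N := by omega
    have hilen : i < (data.length : Int) := lt_of_lt_of_le hlt hN
    have hfold := pvInnerFold data N hN (N - i).toNat i 0 hi (le_of_lt hlt) rfl
    have hlen : (data.take N.toNat).length = N.toNat := by simp; omega
    have hdrop : (data.take N.toNat).drop i.toNat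
        = (data.take N.toNat)[i.toNat]'(by omega) :: (data.take N.toNat).drop (i.toNat + 1) := by
      exact List.drop_eq_getElem_cons (by omega)
    have hgetTake : (data.take N.toNat)[i.toNat]'(by omega) = data[i.toNat]'(by omega) := by
      simp [List.getElem_take]
    have hi1 : (i + 1).toNat = i.toNat + 1 := by omega
    rw [PySem.List.pyRange_one_cons hlt]
    simp only [SumOfTheGoA, pvGet_eq data i hi hilen, hfold, hdrop, hgetTake, zero_add,
      List.sum_cons, pvFm]
    by_cases hx : data[i.toNat]'(by omega)
        = data[i.toNat]'(by omega) + ((data.take N.toNat).drop (i.toNat + 1)).sum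
    · rw [if_pos hx, if_pos hx]
    · rw [if_neg hx, if_neg hx, ih (i + 1) (by omega) (by omega) (by omega), hi1]

-- B's loop over valid indices equals pvBm of the fetched values
theorem pvGoB_eq (data : List Int) :
    ∀ (js : List Int) (s : Int) (b : Option Int),
    (∀ j ∈ js, 0 ≤ j ∧ j < (data.length : Int)) →
    SumOfTheGoB data js s b = pvBm (js.map (fun j => PySem.List.pyGetD data j 0)) s b := by
  intro js
  induction js with
  | nil => intro s b _; simp [SumOfTheGoB, pvBm]
  | cons j rest ih =>
    intro s b hmem
    obtain ⟨hj0, hjl⟩ := hmem j (List.mem_cons_self)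
    have hget := pvGet_eq data j hj0 hjl
    have hgetD : PySem.List.pyGetD data j 0 = data[j.toNat]'(by omega) := by
      simp [PySem.List.pyGetD, hget]
    simp only [SumOfTheGoB, hget, List.map_cons, pvBm, hgetD]
    exact ih _ _ (fun x hx => hmem x (List.mem_cons_of_mem _ hx))

-- the fetched values over range(0, N) are the prefix data[:N]
theorem pvMapRange (data : List Int) :
    ∀ (n : ℕ), (n : Int) ≤ (data.length : Int) →
    (PySem.List.pyRange 0 n 1).map (fun j => PySem.List.pyGetD data j 0) = data.take n := by
  intro n
  induction n with
  | zero => intro _; simp [PySem.List.pyRange_one_eq_nil]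
  | succ n ih =>
    intro hn
    have h1 : ((n : Int) + 1) = ((n + 1 : ℕ) : Int) := by push_cast; ring
    have hsplit : PySem.List.pyRange 0 ((n + 1 : ℕ) : Int) 1
        = PySem.List.pyRange 0 (n : Int) 1 ++ [(n : Int)] := by
      rw [← h1, PySem.List.pyRange_one_succ_right (by omega)]
    have hnlen : n < data.length := by omega
    have hgetD : PySem.List.pyGetD data (n : Int) 0 = data[n] := by
      have := pvGet_eq data (n : Int) (by omega) (by omega)
      simp only [PySem.List.pyGetD, this]
      simp
    rw [hsplit, List.map_append, ih (by omega), List.map_singleton, hgetD, List.take_succ]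
    simp [List.getElem?_eq_getElem hnlen]

-- ===== VERDICT (by name: the statement is the Claim_ definition above) =====
theorem SumOfThe_spec : Claim_equal_SumOfThe := by
  intro N data _ hpre
  unfold Spec_SumOfThe SumOfThe SumOfThe_alt
  unfold Pre_SumOfThe at hpre
  by_cases hN : N ≤ 0
  · rw [PySem.List.pyRange_one_eq_nil hN, PySem.List.pyRange_neg_one_eq_nil (by omega)]
    simp [SumOfTheGoA, SumOfTheGoB]
  · rw [pvGoA_eq data N hpre N.toNat 0 le_rfl (by omega) (by omega)]
    simp only [Int.toNat_zero, List.drop_zero]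
    have hrev : PySem.List.pyRange (N - 1) (-1) (-1) = (PySem.List.pyRange 0 N 1).reverse := by
      rw [PySem.List.pyRange_neg_one_eq_reverse]
      norm_num
    rw [hrev]
    rw [pvGoB_eq data _ 0 none (by
      intro j hj
      rw [List.mem_reverse, PySem.List.mem_pyRange_one] at hj
      exact ⟨hj.1, lt_of_lt_of_le hj.2 hpre⟩)]
    rw [List.map_reverse]
    have hNrange : PySem.List.pyRange 0 N 1 = PySem.List.pyRange 0 (N.toNat : Int) 1 := by
      congr 1
      omega
    rw [hNrange, pvMapRange data N.toNat (by omega), pvBm_reverse, Option.or_none]
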